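-- pv_equiv track=rewrite | github.com/DanielSacro/Advent-of-Code-2024 | Day4/part2.py | find_mas
-- ===== SOURCE A (Python) =====
-- def check_bounds(r, c, tot_rows, tot_cols):
--     result = True
--     if r < 0 or c < 0:
--         result = False
--     elif r > tot_rows - 1 or c > tot_cols - 1:
--         result = False
--     return result
--
-- def init_mas_grid(tot_rows, tot_cols):
--     mas_grid = []
--     for r in range(0, tot_rows):
--         row = []
--         for c in range(0, tot_cols):
--             row.append(".")
--         mas_grid.append(row)
--     return mas_grid
--
-- def find_mas(grid):
--     tot_rows = len(grid)
--     tot_cols = len(grid[0])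
--     mas_grid = init_mas_grid(tot_rows, tot_cols)
--
--     # Scan grid for M-A-S
--     for r in range(0, tot_rows):
--         for c in range(0, tot_cols):
--             # Look for Ms
--             if grid[r][c] != "M":
--                 continue
--
--             # M found, look for As around M
--             for i in range(-1, 2):
--                 for j in range(-1, 2):
--                     # Out of bounds check
--                     valid = check_bounds(r + i, c + j, tot_rows, tot_cols)
--                     if not valid:
--                         continue
--                     elif (i == 0) and (j == 0):
--                         # Only search around the M
--                         continue
--
--                     # Look for A
--                     if grid[r + i][c + j] != "A":
--                         continue
--
--                     # A found, look for S in same direction as A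
--                     # Out of bounds check
--                     valid = check_bounds(r + 2*i, c + 2*j, tot_rows, tot_cols)
--                     if not valid:
--                         continue
--
--                     # Look for S
--                     if grid[r + 2*i][c + 2*j] != "S":
--                         continue
--
--                     # S found => MAS found, save location
--                     mas_grid[r][c] = "M"
--                     mas_grid[r + i][c + j] = "A"
--                     mas_grid[r + 2*i][c + 2*j] = "S"
--     return mas_grid
-- ===== SOURCE B (Python) =====
-- def find_mas(grid):
--     tot_rows = len(grid)
--     tot_cols = len(grid[0])
--     dirs = [(i, j) for i in (-1, 0, 1) for j in (-1, 0, 1) if (i, j) != (0, 0)]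
--
--     def cell(r, c):
--         ch = grid[r][c]
--         if ch == "M":
--             if any(0 <= r + i < tot_rows and 0 <= c + j < tot_cols
--                    and 0 <= r + 2 * i < tot_rows and 0 <= c + 2 * j < tot_cols
--                    and grid[r + i][c + j] == "A" and grid[r + 2 * i][c + 2 * j] == "S"
--                    for (i, j) in dirs):
--                 return "M"
--         elif ch == "A":
--             if any(0 <= r - i < tot_rows and 0 <= c - j < tot_cols
--                    and 0 <= r + i < tot_rows and 0 <= c + j < tot_cols
--                    and grid[r - i][c - j] == "M" and grid[r + i][c + j] == "S"
--                    for (i, j) in dirs):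
--                 return "A"
--         elif ch == "S":
--             if any(0 <= r - i < tot_rows and 0 <= c - j < tot_cols
--                    and 0 <= r - 2 * i < tot_rows and 0 <= c - 2 * j < tot_cols
--                    and grid[r - i][c - j] == "A" and grid[r - 2 * i][c - 2 * j] == "M"
--                    for (i, j) in dirs):
--                 return "S"
--         return "."
--
--     return [[cell(r, c) for c in range(tot_cols)] for r in range(tot_rows)]
-- ===== Notes on version B (the rewrite author's own statement) =====
-- stated objective: alternative
-- what changed: Instead of mutating a pre-built '.' grid by scanning for M endpoints and writing the three letters of each found M-A-S run, B builds the output functionally cell by cell: each cell decides from its own letter and the 8 directions whether it is the M, A or S of some run, with no mutation and no shared output state.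
import Mathlib
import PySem

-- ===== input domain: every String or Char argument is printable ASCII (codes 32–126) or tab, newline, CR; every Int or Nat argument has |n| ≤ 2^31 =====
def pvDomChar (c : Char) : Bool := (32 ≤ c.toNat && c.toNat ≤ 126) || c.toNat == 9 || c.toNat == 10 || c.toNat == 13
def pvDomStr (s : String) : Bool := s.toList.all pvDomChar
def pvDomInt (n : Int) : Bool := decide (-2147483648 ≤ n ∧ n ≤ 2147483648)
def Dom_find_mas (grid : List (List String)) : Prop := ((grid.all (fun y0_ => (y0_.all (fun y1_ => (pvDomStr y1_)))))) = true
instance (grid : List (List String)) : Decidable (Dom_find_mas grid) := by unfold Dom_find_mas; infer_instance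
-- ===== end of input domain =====

-- B builds the output grid functionally cell by cell (each cell decides from its own letter and the 8
-- directions whether it is the M, A or S of a found M-A-S run) instead of A's mutation of a '.' grid
-- while scanning for M endpoints; alternative decomposition, same asymptotic cost.
-- A mutates only its freshly created mas_grid, never the argument; the argument grid is not mutated.

-- ===== PORT A =====
-- grid[r][c]; used only where the surrounding guards guarantee 0 ≤ r, c and in-range (Pre_ gives row length)
def atI (g : List (List String)) (r c : Int) : String := (g.getD r.toNat []).getD c.toNat ""

def check_bounds (r c tot_rows tot_cols : Int) : Bool :=
  if r < 0 || c < 0 then false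
  else if r > tot_rows - 1 || c > tot_cols - 1 then false
  else true

def init_mas_grid (tot_rows tot_cols : Int) : List (List String) :=
  (PySem.List.pyRange 0 tot_rows 1).foldl
    (fun mg _ => mg ++ [(PySem.List.pyRange 0 tot_cols 1).foldl (fun row _ => row ++ ["."]) []]) []

-- mas_grid[r][c] = v; only reached when check_bounds guarantees 0 ≤ r, c (so .toNat is exact) and in-range
def setCell (mg : List (List String)) (r c : Int) (v : String) : List (List String) :=
  mg.modify r.toNat (fun row => row.set c.toNat v)

def find_mas (grid : List (List String)) : List (List String) :=
  let tot_rows : Int := grid.length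
  let tot_cols : Int := ((grid.headD []).length : Int)   -- len(grid[0]); Pre_ excludes the empty grid
  let mas_grid := init_mas_grid tot_rows tot_cols
  (PySem.List.pyRange 0 tot_rows 1).foldl (fun mg r =>
    (PySem.List.pyRange 0 tot_cols 1).foldl (fun mg c =>
      if atI grid r c ≠ "M" then mg
      else
        (PySem.List.pyRange (-1) 2 1).foldl (fun mg i =>
          (PySem.List.pyRange (-1) 2 1).foldl (fun mg j =>
            if !(check_bounds (r + i) (c + j) tot_rows tot_cols) then mg
            else if i = 0 ∧ j = 0 then mg
            else if atI grid (r + i) (c + j) ≠ "A" then mg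
            else if !(check_bounds (r + 2*i) (c + 2*j) tot_rows tot_cols) then mg
            else if atI grid (r + 2*i) (c + 2*j) ≠ "S" then mg
            else setCell (setCell (setCell mg r c "M") (r + i) (c + j) "A") (r + 2*i) (c + 2*j) "S")
          mg) mg) mg) mas_grid

-- ===== PORT B =====
def bdirs : List (Int × Int) :=
  ((([-1, 0, 1] : List Int).flatMap (fun i => ([-1, 0, 1] : List Int).map (fun j => (i, j)))).filter
    (fun d => d ≠ ((0 : Int), (0 : Int))))

def bcell (grid : List (List String)) (tr tc r c : Int) : String :=
  let ch := atI grid r c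
  if ch = "M" then
    if bdirs.any (fun d =>
        decide (0 ≤ r + d.1 ∧ r + d.1 < tr ∧ 0 ≤ c + d.2 ∧ c + d.2 < tc ∧
                0 ≤ r + 2*d.1 ∧ r + 2*d.1 < tr ∧ 0 ≤ c + 2*d.2 ∧ c + 2*d.2 < tc) &&
        (atI grid (r + d.1) (c + d.2) == "A") && (atI grid (r + 2*d.1) (c + 2*d.2) == "S"))
    then "M" else "."
  else if ch = "A" then
    if bdirs.any (fun d =>
        decide (0 ≤ r - d.1 ∧ r - d.1 < tr ∧ 0 ≤ c - d.2 ∧ c - d.2 < tc ∧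
                0 ≤ r + d.1 ∧ r + d.1 < tr ∧ 0 ≤ c + d.2 ∧ c + d.2 < tc) &&
        (atI grid (r - d.1) (c - d.2) == "M") && (atI grid (r + d.1) (c + d.2) == "S"))
    then "A" else "."
  else if ch = "S" then
    if bdirs.any (fun d =>
        decide (0 ≤ r - d.1 ∧ r - d.1 < tr ∧ 0 ≤ c - d.2 ∧ c - d.2 < tc ∧
                0 ≤ r - 2*d.1 ∧ r - 2*d.1 < tr ∧ 0 ≤ c - 2*d.2 ∧ c - 2*d.2 < tc) &&
        (atI grid (r - d.1) (c - d.2) == "A") && (atI grid (r - 2*d.1) (c - 2*d.2) == "M"))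
    then "S" else "."
  else "."

def find_mas_alt (grid : List (List String)) : List (List String) :=
  let tot_rows : Int := grid.length
  let tot_cols : Int := ((grid.headD []).length : Int)
  (PySem.List.pyRange 0 tot_rows 1).map (fun r =>
    (PySem.List.pyRange 0 tot_cols 1).map (fun c => bcell grid tot_rows tot_cols r c))

-- ===== PRECONDITION & SPEC =====
-- Pre_ excludes exactly the inputs where Python A raises: the empty grid (grid[0] is an IndexError)
-- and ragged grids with a row shorter than row 0 (grid[r][c] raises for some scanned c < len(grid[0])).
def Pre_find_mas (grid : List (List String)) : Prop :=
  grid ≠ [] ∧ ∀ row ∈ grid, (grid.headD []).length ≤ row.length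
instance (grid : List (List String)) : Decidable (Pre_find_mas grid) := by
  unfold Pre_find_mas; infer_instance

def pvWitness_find_mas : List (List String) :=
  [["M", ".", "."], [".", "A", "."], [".", ".", "S"]]

def Spec_find_mas (grid : List (List String)) (out : List (List String)) : Prop := out = find_mas_alt grid
instance (grid : List (List String)) (out : List (List String)) : Decidable (Spec_find_mas grid out) := by
  unfold Spec_find_mas; infer_instance

-- ===== CLAIM (what is proved, stated in full; the proofs are below) =====
def Claim_equal_find_mas : Prop :=
  ∀ (grid : List (List String)), Dom_find_mas grid → Pre_find_mas grid → Spec_find_mas grid (find_mas grid)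

-- ===== LEMMAS AND PROOFS =====

-- 0 ≤ r < tr ∧ 0 ≤ c < tc, as A's check_bounds computes it
def inb (tr tc r c : Int) : Bool := decide (0 ≤ r ∧ r < tr ∧ 0 ≤ c ∧ c < tc)

lemma check_bounds_eq_inb (r c tr tc : Int) : check_bounds r c tr tc = inb tr tc r c := by
  simp only [check_bounds, inb]
  split_ifs with h1 h2 <;> simp_all <;> omega

-- an M-A-S run anchored at its M (r,c) going in direction (i,j)
def tri (g : List (List String)) (tr tc r c i j : Int) : Bool :=
  inb tr tc r c && inb tr tc (r + i) (c + j) && inb tr tc (r + 2*i) (c + 2*j) &&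
  !(i == 0 && j == 0) &&
  (atI g r c == "M") && (atI g (r + i) (c + j) == "A") && (atI g (r + 2*i) (c + 2*j) == "S")

def dirs9 : List (Int × Int) :=
  (PySem.List.pyRange (-1) 2 1).flatMap (fun i => (PySem.List.pyRange (-1) 2 1).map (fun j => (i, j)))

-- the cells written by the anchor p (A's inner double loop at M-cell p)
def contrib (g : List (List String)) (tr tc : Int) (p : Int × Int) (x y : Int) : Bool :=
  dirs9.any (fun d => tri g tr tc p.1 p.2 d.1 d.2 &&
    ((x == p.1 && y == p.2) || (x == p.1 + d.1 && y == p.2 + d.2) ||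
     (x == p.1 + 2*d.1 && y == p.2 + 2*d.2)))

def markedBy (g : List (List String)) (tr tc : Int) (done : List (Int × Int)) (x y : Int) : Bool :=
  done.any (fun p => contrib g tr tc p x y)

def build (tr tc : Int) (f : Int → Int → String) : List (List String) :=
  (PySem.List.pyRange 0 tr 1).map (fun r => (PySem.List.pyRange 0 tc 1).map (fun c => f r c))

def stateOf (g : List (List String)) (tr tc : Int) (done : List (Int × Int)) : List (List String) :=
  build tr tc (fun x y => if markedBy g tr tc done x y then atI g x y else ".")

lemma build_congr {tr tc : Int} {f f' : Int → Int → String}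
    (h : ∀ x y, 0 ≤ x → x < tr → 0 ≤ y → y < tc → f x y = f' x y) :
    build tr tc f = build tr tc f' := by
  simp only [build]
  apply List.map_congr_left
  intro r hr
  apply List.map_congr_left
  intro c hc
  rw [PySem.List.mem_pyRange_one] at hr hc
  exact h r c hr.1 hr.2 hc.1 hc.2

lemma init_eq_build (tr tc : Int) : init_mas_grid tr tc = build tr tc (fun _ _ => ".") := by
  simp only [init_mas_grid, build, PySem.List.foldl_append_singleton_eq_map, List.nil_append]

lemma setCell_build {tr tc x y : Int} (f : Int → Int → String) (v : String)
    (hx : 0 ≤ x) (_hx' : x < tr) (hy : 0 ≤ y) (_hy' : y < tc) :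
    setCell (build tr tc f) x y v =
      build tr tc (fun a b => if a = x ∧ b = y then v else f a b) := by
  apply List.ext_getElem
  · simp [setCell, build, List.length_modify]
  · intro n h1 h2
    simp only [setCell, build] at h1 h2 ⊢
    rw [List.getElem_modify]
    by_cases hn : x.toNat = n
    · simp only [if_pos hn]
      apply List.ext_getElem
      · simp
      · intro m hm1 hm2
        simp only [List.getElem_map, List.getElem_set, PySem.List.getElem_pyRange_one]
        have hxn : (0 : Int) + (n : Int) = x := by omega
        by_cases hm : y.toNat = m
        · have hym : (0:Int) + (m:Int) = y := by omega
          simp [hm, hxn, hym]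
        · rw [if_neg hm, if_neg (by intro h; exact hm (by omega))]
    · simp only [if_neg hn]
      simp only [List.getElem_map, PySem.List.getElem_pyRange_one]
      apply List.map_congr_left
      intro b hb
      rw [if_neg (by intro h; exact hn (by omega))]

-- one pass of A's innermost (j-)body, as a function of the anchor p and the direction d
def dirStep (g : List (List String)) (tr tc : Int) (p : Int × Int)
    (mg : List (List String)) (d : Int × Int) : List (List String) :=
  if !(check_bounds (p.1 + d.1) (p.2 + d.2) tr tc) then mg
  else if d.1 = 0 ∧ d.2 = 0 then mg
  else if atI g (p.1 + d.1) (p.2 + d.2) ≠ "A" then mg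
  else if !(check_bounds (p.1 + 2*d.1) (p.2 + 2*d.2) tr tc) then mg
  else if atI g (p.1 + 2*d.1) (p.2 + 2*d.2) ≠ "S" then mg
  else setCell (setCell (setCell mg p.1 p.2 "M") (p.1 + d.1) (p.2 + d.2) "A")
         (p.1 + 2*d.1) (p.2 + 2*d.2) "S"

-- A's per-anchor body
def anchorStep (g : List (List String)) (tr tc : Int)
    (mg : List (List String)) (p : Int × Int) : List (List String) :=
  if atI g p.1 p.2 ≠ "M" then mg else dirs9.foldl (dirStep g tr tc p) mg

lemma dirStep_single (g : List (List String)) {tr tc : Int} (p : Int × Int) (d : Int × Int)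
    (hp : inb tr tc p.1 p.2 = true) (hM : atI g p.1 p.2 = "M") (m : Int → Int → Bool) :
    dirStep g tr tc p (build tr tc (fun x y => if m x y then atI g x y else ".")) d =
      build tr tc (fun x y =>
        if (m x y || (tri g tr tc p.1 p.2 d.1 d.2 &&
             ((x == p.1 && y == p.2) || (x == p.1 + d.1 && y == p.2 + d.2) ||
              (x == p.1 + 2*d.1 && y == p.2 + 2*d.2))))
        then atI g x y else ".") := by
  unfold dirStep
  split_ifs with h1 h2 h3 h4 h5
  · have htri : tri g tr tc p.1 p.2 d.1 d.2 = false := by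
      simp only [check_bounds_eq_inb, Bool.not_eq_eq_eq_not, Bool.not_true] at h1
      simp [tri, h1]
    refine Eq.symm (build_congr ?_)
    intro x y _ _ _ _
    simp [htri]
  · have htri : tri g tr tc p.1 p.2 d.1 d.2 = false := by
      simp [tri, h2.1, h2.2]
    refine Eq.symm (build_congr ?_)
    intro x y _ _ _ _
    simp [htri]
  · have htri : tri g tr tc p.1 p.2 d.1 d.2 = false := by
      simp [tri, h3]
    refine Eq.symm (build_congr ?_)
    intro x y _ _ _ _
    simp [htri]
  · have htri : tri g tr tc p.1 p.2 d.1 d.2 = false := by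
      simp only [check_bounds_eq_inb, Bool.not_eq_eq_eq_not, Bool.not_true] at h4
      simp [tri, h4]
    refine Eq.symm (build_congr ?_)
    intro x y _ _ _ _
    simp [htri]
  · have htri : tri g tr tc p.1 p.2 d.1 d.2 = false := by
      simp [tri, h5]
    refine Eq.symm (build_congr ?_)
    intro x y _ _ _ _
    simp [htri]
  · -- all guards passed: the three writes land
    simp only [check_bounds_eq_inb, Bool.not_eq_eq_eq_not, Bool.not_true, Bool.not_eq_false] at h1 h4
    push Not at h3 h5
    have htri : tri g tr tc p.1 p.2 d.1 d.2 = true := by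
      simp [tri, hp, h1, h4, hM, h3, h5]
      exact not_and_or.mp h2
    have hpb := hp
    simp only [inb, decide_eq_true_eq] at hpb h1 h4
    rw [setCell_build (tr := tr) (tc := tc) (x := p.1) (y := p.2) _ "M"
          (by omega) (by omega) (by omega) (by omega),
        setCell_build (tr := tr) (tc := tc) (x := p.1 + d.1) (y := p.2 + d.2) _ "A"
          (by omega) (by omega) (by omega) (by omega),
        setCell_build (tr := tr) (tc := tc) (x := p.1 + 2*d.1) (y := p.2 + 2*d.2) _ "S"
          (by omega) (by omega) (by omega) (by omega)]
    apply build_congr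
    intro x y _ _ _ _
    by_cases e3 : x = p.1 + 2*d.1 ∧ y = p.2 + 2*d.2
    · simp [e3.1, e3.2, htri, h5]
    · rw [if_neg e3]
      by_cases e2 : x = p.1 + d.1 ∧ y = p.2 + d.2
      · simp [e2.1, e2.2, htri, h3]
      · rw [if_neg e2]
        by_cases e1 : x = p.1 ∧ y = p.2
        · simp [e1.1, e1.2, htri, hM]
        · rw [if_neg e1]
          have : ((x == p.1 && y == p.2) || (x == p.1 + d.1 && y == p.2 + d.2) ||
              (x == p.1 + 2*d.1 && y == p.2 + 2*d.2)) = false := by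
            simp only [Bool.or_eq_false_iff, Bool.and_eq_false_iff, beq_eq_false_iff_ne, ne_eq]
            refine ⟨⟨?_, ?_⟩, ?_⟩ <;> tauto
          simp [this]

lemma dirFold (g : List (List String)) {tr tc : Int} (p : Int × Int)
    (hp : inb tr tc p.1 p.2 = true) (hM : atI g p.1 p.2 = "M")
    (DL : List (Int × Int)) (m : Int → Int → Bool) :
    DL.foldl (dirStep g tr tc p) (build tr tc (fun x y => if m x y then atI g x y else ".")) =
      build tr tc (fun x y =>
        if (m x y || DL.any (fun d => tri g tr tc p.1 p.2 d.1 d.2 &&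
             ((x == p.1 && y == p.2) || (x == p.1 + d.1 && y == p.2 + d.2) ||
              (x == p.1 + 2*d.1 && y == p.2 + 2*d.2))))
        then atI g x y else ".") := by
  induction DL generalizing m with
  | nil => simp
  | cons d DL ih =>
    simp only [List.foldl_cons, List.any_cons]
    rw [dirStep_single g p d hp hM m, ih]
    apply build_congr
    intro x y _ _ _ _
    congr 1
    simp [Bool.or_assoc]

lemma anchorStep_state (g : List (List String)) {tr tc : Int}
    (done : List (Int × Int)) (p : Int × Int) (hp : inb tr tc p.1 p.2 = true) :
    anchorStep g tr tc (stateOf g tr tc done) p = stateOf g tr tc (done ++ [p]) := by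
  unfold anchorStep
  by_cases hM : atI g p.1 p.2 = "M"
  · rw [if_neg (by simp [hM])]
    unfold stateOf
    rw [dirFold g p hp hM]
    apply build_congr
    intro x y _ _ _ _
    congr 1
    simp [markedBy, contrib]
  · rw [if_pos (by simp [hM])]
    unfold stateOf
    apply build_congr
    intro x y _ _ _ _
    congr 1
    have hc : contrib g tr tc p x y = false := by
      simp [contrib, tri, hM]
    simp [markedBy, hc]

lemma loopA (g : List (List String)) {tr tc : Int} (L done : List (Int × Int))
    (hL : ∀ p ∈ L, inb tr tc p.1 p.2 = true) :
    L.foldl (anchorStep g tr tc) (stateOf g tr tc done) = stateOf g tr tc (done ++ L) := by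
  induction L generalizing done with
  | nil => simp
  | cons p L ih =>
    simp only [List.foldl_cons]
    rw [anchorStep_state g done p (hL p (by simp)),
        ih (done ++ [p]) (fun q hq => hL q (List.mem_cons_of_mem _ hq))]
    simp

def anchors (tr tc : Int) : List (Int × Int) :=
  (PySem.List.pyRange 0 tr 1).flatMap (fun r => (PySem.List.pyRange 0 tc 1).map (fun c => (r, c)))

lemma anchorStep_eq_loops (g : List (List String)) (tr tc r c : Int) (mg : List (List String)) :
    (if atI g r c ≠ "M" then mg
     else
       (PySem.List.pyRange (-1) 2 1).foldl (fun mg i =>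
         (PySem.List.pyRange (-1) 2 1).foldl (fun mg j =>
           if !(check_bounds (r + i) (c + j) tr tc) then mg
           else if i = 0 ∧ j = 0 then mg
           else if atI g (r + i) (c + j) ≠ "A" then mg
           else if !(check_bounds (r + 2*i) (c + 2*j) tr tc) then mg
           else if atI g (r + 2*i) (c + 2*j) ≠ "S" then mg
           else setCell (setCell (setCell mg r c "M") (r + i) (c + j) "A") (r + 2*i) (c + 2*j) "S")
         mg) mg) = anchorStep g tr tc mg (r, c) := by
  simp only [anchorStep, dirStep, dirs9, List.foldl_flatMap, List.foldl_map]

lemma find_mas_eq_state (grid : List (List String)) :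
    find_mas grid =
      stateOf grid grid.length ((grid.headD []).length : Int)
        (anchors grid.length ((grid.headD []).length : Int)) := by
  have hanch : ∀ p ∈ anchors (grid.length : Int) ((grid.headD []).length : Int),
      inb (grid.length : Int) ((grid.headD []).length : Int) p.1 p.2 = true := by
    rintro ⟨a, b⟩ hp
    simp only [anchors, List.mem_flatMap, List.mem_map, PySem.List.mem_pyRange_one] at hp
    obtain ⟨r, hr, c, hc, hrc⟩ := hp
    cases hrc
    simp only [inb, decide_eq_true_eq]
    omega
  have hl := loopA grid (anchors (grid.length : Int) ((grid.headD []).length : Int)) [] hanch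
  rw [List.nil_append] at hl
  rw [← hl]
  have h0 : init_mas_grid (grid.length : Int) ((grid.headD []).length : Int) =
      stateOf grid (grid.length : Int) ((grid.headD []).length : Int) [] := by
    rw [init_eq_build, stateOf]
    apply build_congr
    intro x y _ _ _ _
    simp [markedBy]
  unfold find_mas
  simp only [h0, anchors, List.foldl_flatMap, List.foldl_map]
  simp only [anchorStep_eq_loops]

lemma find_mas_alt_eq_build (grid : List (List String)) :
    find_mas_alt grid =
      build grid.length ((grid.headD []).length : Int)
        (fun r c => bcell grid grid.length ((grid.headD []).length : Int) r c) := by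
  rfl

lemma mem_anchors {tr tc : Int} (p : Int × Int) :
    p ∈ anchors tr tc ↔ (0 ≤ p.1 ∧ p.1 < tr ∧ 0 ≤ p.2 ∧ p.2 < tc) := by
  obtain ⟨a, b⟩ := p
  simp only [anchors, List.mem_flatMap, List.mem_map, PySem.List.mem_pyRange_one,
    Prod.mk.injEq]
  constructor
  · rintro ⟨r, hr, c, hc, h1, h2⟩
    subst h1; subst h2
    exact ⟨hr.1, hr.2, hc.1, hc.2⟩
  · rintro ⟨h1, h2, h3, h4⟩
    exact ⟨a, ⟨h1, h2⟩, b, ⟨h3, h4⟩, rfl, rfl⟩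

lemma mem_dirs9 (d : Int × Int) :
    d ∈ dirs9 ↔ (-1 ≤ d.1 ∧ d.1 ≤ 1 ∧ -1 ≤ d.2 ∧ d.2 ≤ 1) := by
  obtain ⟨i, j⟩ := d
  simp only [dirs9, List.mem_flatMap, List.mem_map, PySem.List.mem_pyRange_one,
    Prod.mk.injEq]
  constructor
  · rintro ⟨a, ha, b, hb, h1, h2⟩
    subst h1; subst h2
    omega
  · rintro ⟨h1, h2, h3, h4⟩
    exact ⟨i, by omega, j, by omega, rfl, rfl⟩

lemma mem_bdirs (d : Int × Int) :
    d ∈ bdirs ↔ (-1 ≤ d.1 ∧ d.1 ≤ 1 ∧ -1 ≤ d.2 ∧ d.2 ≤ 1 ∧ ¬(d.1 = 0 ∧ d.2 = 0)) := by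
  obtain ⟨i, j⟩ := d
  simp only [bdirs, List.mem_filter, List.mem_flatMap, List.mem_map, Prod.mk.injEq,
    decide_eq_true_eq, ne_eq]
  constructor
  · rintro ⟨⟨a, ha, b, hb, h1, h2⟩, hne⟩
    subst h1; subst h2
    simp only [List.mem_cons, List.not_mem_nil, or_false] at ha hb
    simp only [not_and] at hne
    constructor; · omega
    constructor; · omega
    constructor; · omega
    constructor; · omega
    intro hij; exact hne hij.1 hij.2
  · rintro ⟨h1, h2, h3, h4, hne⟩
    refine ⟨⟨i, by simp; omega, j, by simp; omega, rfl, rfl⟩, ?_⟩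
    simp only [not_and]
    intro hi hj; exact hne ⟨hi, hj⟩

lemma tri_iff (g : List (List String)) (tr tc r c i j : Int) :
    tri g tr tc r c i j = true ↔
      ((0 ≤ r ∧ r < tr ∧ 0 ≤ c ∧ c < tc) ∧
       (0 ≤ r + i ∧ r + i < tr ∧ 0 ≤ c + j ∧ c + j < tc) ∧
       (0 ≤ r + 2*i ∧ r + 2*i < tr ∧ 0 ≤ c + 2*j ∧ c + 2*j < tc) ∧
       ¬(i = 0 ∧ j = 0) ∧
       atI g r c = "M" ∧ atI g (r + i) (c + j) = "A" ∧ atI g (r + 2*i) (c + 2*j) = "S") := by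
  simp only [tri, Bool.and_eq_true, inb, decide_eq_true_eq, beq_iff_eq,
    Bool.not_eq_true', Bool.and_eq_false_iff, beq_eq_false_iff_ne, ne_eq]
  constructor
  · rintro ⟨⟨⟨⟨⟨⟨h1, h2⟩, h3⟩, h4⟩, h5⟩, h6⟩, h7⟩
    refine ⟨h1, h2, h3, ?_, h5, h6, h7⟩
    rcases h4 with h | h <;> tauto
  · rintro ⟨h1, h2, h3, h4, h5, h6, h7⟩
    refine ⟨⟨⟨⟨⟨⟨h1, h2⟩, h3⟩, ?_⟩, h5⟩, h6⟩, h7⟩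
    by_cases hi : i = 0
    · right; intro hj; exact h4 ⟨hi, hj⟩
    · left; exact hi

lemma marked_iff (g : List (List String)) {tr tc : Int} (x y : Int) :
    markedBy g tr tc (anchors tr tc) x y = true ↔
      ∃ d ∈ dirs9,
        (tri g tr tc x y d.1 d.2 = true ∨
         tri g tr tc (x - d.1) (y - d.2) d.1 d.2 = true ∨
         tri g tr tc (x - 2*d.1) (y - 2*d.2) d.1 d.2 = true) := by
  unfold markedBy contrib
  rw [List.any_eq_true]
  constructor
  · rintro ⟨⟨a, b⟩, _, hc⟩
    rw [List.any_eq_true] at hc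
    obtain ⟨d, hd, hcd⟩ := hc
    rw [Bool.and_eq_true] at hcd
    obtain ⟨ht, hhit⟩ := hcd
    refine ⟨d, hd, ?_⟩
    simp only [Bool.or_eq_true, Bool.and_eq_true, beq_iff_eq] at hhit
    rcases hhit with (⟨hx1, hy1⟩ | ⟨hx1, hy1⟩) | ⟨hx1, hy1⟩
    · exact Or.inl (by rw [hx1, hy1]; exact ht)
    · refine Or.inr (Or.inl ?_)
      have ha : x - d.1 = a := by omega
      have hb : y - d.2 = b := by omega
      rw [ha, hb]; exact ht
    · refine Or.inr (Or.inr ?_)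
      have ha : x - 2*d.1 = a := by omega
      have hb : y - 2*d.2 = b := by omega
      rw [ha, hb]; exact ht
  · rintro ⟨d, hd, h | h | h⟩
    · refine ⟨(x, y), ?_, ?_⟩
      · rw [mem_anchors]
        have := (tri_iff g tr tc x y d.1 d.2).mp h
        exact this.1
      · rw [List.any_eq_true]
        exact ⟨d, hd, by simp [h]⟩
    · refine ⟨(x - d.1, y - d.2), ?_, ?_⟩
      · rw [mem_anchors]
        have := (tri_iff g tr tc (x - d.1) (y - d.2) d.1 d.2).mp h
        exact this.1
      · rw [List.any_eq_true]
        exact ⟨d, hd, by simp [h]⟩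
    · refine ⟨(x - 2*d.1, y - 2*d.2), ?_, ?_⟩
      · rw [mem_anchors]
        have := (tri_iff g tr tc (x - 2*d.1) (y - 2*d.2) d.1 d.2).mp h
        exact this.1
      · rw [List.any_eq_true]
        exact ⟨d, hd, by simp [h]⟩

lemma anyM_iff (grid : List (List String)) {tr tc x y : Int}
    (hx : 0 ≤ x) (hx' : x < tr) (hy : 0 ≤ y) (hy' : y < tc) (hM : atI grid x y = "M") :
    (bdirs.any (fun d =>
        decide (0 ≤ x + d.1 ∧ x + d.1 < tr ∧ 0 ≤ y + d.2 ∧ y + d.2 < tc ∧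
                0 ≤ x + 2*d.1 ∧ x + 2*d.1 < tr ∧ 0 ≤ y + 2*d.2 ∧ y + 2*d.2 < tc) &&
        (atI grid (x + d.1) (y + d.2) == "A") && (atI grid (x + 2*d.1) (y + 2*d.2) == "S")) = true)
      ↔ markedBy grid tr tc (anchors tr tc) x y = true := by
  rw [marked_iff, List.any_eq_true]
  constructor
  · rintro ⟨d, hd, hf⟩
    rw [mem_bdirs] at hd
    refine ⟨d, (mem_dirs9 d).mpr ⟨hd.1, hd.2.1, hd.2.2.1, hd.2.2.2.1⟩, Or.inl ?_⟩
    rw [tri_iff]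
    simp only [Bool.and_eq_true, decide_eq_true_eq, beq_iff_eq] at hf
    obtain ⟨⟨hb, hA⟩, hS⟩ := hf
    obtain ⟨b1, b2, b3, b4, b5, b6, b7, b8⟩ := hb
    exact ⟨⟨hx, hx', hy, hy'⟩, ⟨b1, b2, b3, b4⟩, ⟨b5, b6, b7, b8⟩, hd.2.2.2.2, hM, hA, hS⟩
  · rintro ⟨d, hd9, h | h | h⟩
    · rw [tri_iff] at h
      obtain ⟨h1, h2, h3, hne, _, hA, hS⟩ := h
      rw [mem_dirs9] at hd9
      refine ⟨d, (mem_bdirs d).mpr ⟨hd9.1, hd9.2.1, hd9.2.2.1, hd9.2.2.2, hne⟩, ?_⟩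
      simp only [Bool.and_eq_true, decide_eq_true_eq, beq_iff_eq]
      exact ⟨⟨⟨h2.1, h2.2.1, h2.2.2.1, h2.2.2.2, h3.1, h3.2.1, h3.2.2.1, h3.2.2.2⟩, hA⟩, hS⟩
    · rw [tri_iff] at h
      have hmid := h.2.2.2.2.2.1
      rw [show x - d.1 + d.1 = x from by omega, show y - d.2 + d.2 = y from by omega, hM] at hmid
      exact absurd hmid (by decide)
    · rw [tri_iff] at h
      have hend := h.2.2.2.2.2.2
      rw [show x - 2*d.1 + 2*d.1 = x from by omega, show y - 2*d.2 + 2*d.2 = y from by omega,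
          hM] at hend
      exact absurd hend (by decide)

lemma anyA_iff (grid : List (List String)) {tr tc x y : Int}
    (hx : 0 ≤ x) (_hx' : x < tr) (hy : 0 ≤ y) (_hy' : y < tc) (hA : atI grid x y = "A") :
    (bdirs.any (fun d =>
        decide (0 ≤ x - d.1 ∧ x - d.1 < tr ∧ 0 ≤ y - d.2 ∧ y - d.2 < tc ∧
                0 ≤ x + d.1 ∧ x + d.1 < tr ∧ 0 ≤ y + d.2 ∧ y + d.2 < tc) &&
        (atI grid (x - d.1) (y - d.2) == "M") && (atI grid (x + d.1) (y + d.2) == "S")) = true)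
      ↔ markedBy grid tr tc (anchors tr tc) x y = true := by
  rw [marked_iff, List.any_eq_true]
  constructor
  · rintro ⟨d, hd, hf⟩
    rw [mem_bdirs] at hd
    refine ⟨d, (mem_dirs9 d).mpr ⟨hd.1, hd.2.1, hd.2.2.1, hd.2.2.2.1⟩, Or.inr (Or.inl ?_)⟩
    rw [tri_iff]
    simp only [Bool.and_eq_true, decide_eq_true_eq, beq_iff_eq] at hf
    obtain ⟨⟨hb, hMl⟩, hS⟩ := hf
    obtain ⟨b1, b2, b3, b4, b5, b6, b7, b8⟩ := hb
    refine ⟨⟨b1, b2, b3, b4⟩,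
      ⟨by omega, by omega, by omega, by omega⟩,
      ⟨by omega, by omega, by omega, by omega⟩, hd.2.2.2.2, hMl, ?_, ?_⟩
    · rw [show x - d.1 + d.1 = x from by omega, show y - d.2 + d.2 = y from by omega]
      exact hA
    · rw [show x - d.1 + 2*d.1 = x + d.1 from by omega,
          show y - d.2 + 2*d.2 = y + d.2 from by omega]
      exact hS
  · rintro ⟨d, hd9, h | h | h⟩
    · rw [tri_iff] at h
      rw [h.2.2.2.2.1] at hA
      exact absurd hA (by decide)
    · rw [tri_iff] at h
      obtain ⟨h1, h2, h3, hne, hMl, _, hS⟩ := h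
      rw [mem_dirs9] at hd9
      refine ⟨d, (mem_bdirs d).mpr ⟨hd9.1, hd9.2.1, hd9.2.2.1, hd9.2.2.2, hne⟩, ?_⟩
      simp only [Bool.and_eq_true, decide_eq_true_eq, beq_iff_eq]
      refine ⟨⟨⟨h1.1, h1.2.1, h1.2.2.1, h1.2.2.2, by omega, by omega, by omega, by omega⟩,
        hMl⟩, ?_⟩
      rw [show x + d.1 = x - d.1 + 2*d.1 from by omega,
          show y + d.2 = y - d.2 + 2*d.2 from by omega]
      exact hS
    · rw [tri_iff] at h
      have hend := h.2.2.2.2.2.2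
      rw [show x - 2*d.1 + 2*d.1 = x from by omega, show y - 2*d.2 + 2*d.2 = y from by omega,
          hA] at hend
      exact absurd hend (by decide)

lemma anyS_iff (grid : List (List String)) {tr tc x y : Int}
    (hx : 0 ≤ x) (hx' : x < tr) (hy : 0 ≤ y) (hy' : y < tc) (hS : atI grid x y = "S") :
    (bdirs.any (fun d =>
        decide (0 ≤ x - d.1 ∧ x - d.1 < tr ∧ 0 ≤ y - d.2 ∧ y - d.2 < tc ∧
                0 ≤ x - 2*d.1 ∧ x - 2*d.1 < tr ∧ 0 ≤ y - 2*d.2 ∧ y - 2*d.2 < tc) &&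
        (atI grid (x - d.1) (y - d.2) == "A") && (atI grid (x - 2*d.1) (y - 2*d.2) == "M")) = true)
      ↔ markedBy grid tr tc (anchors tr tc) x y = true := by
  rw [marked_iff, List.any_eq_true]
  constructor
  · rintro ⟨d, hd, hf⟩
    rw [mem_bdirs] at hd
    refine ⟨d, (mem_dirs9 d).mpr ⟨hd.1, hd.2.1, hd.2.2.1, hd.2.2.2.1⟩, Or.inr (Or.inr ?_)⟩
    rw [tri_iff]
    simp only [Bool.and_eq_true, decide_eq_true_eq, beq_iff_eq] at hf
    obtain ⟨⟨hb, hAl⟩, hMl⟩ := hf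
    obtain ⟨b1, b2, b3, b4, b5, b6, b7, b8⟩ := hb
    refine ⟨⟨b5, b6, b7, b8⟩,
      ⟨by omega, by omega, by omega, by omega⟩,
      ⟨by omega, by omega, by omega, by omega⟩, hd.2.2.2.2, hMl, ?_, ?_⟩
    · rw [show x - 2*d.1 + d.1 = x - d.1 from by omega,
          show y - 2*d.2 + d.2 = y - d.2 from by omega]
      exact hAl
    · rw [show x - 2*d.1 + 2*d.1 = x from by omega, show y - 2*d.2 + 2*d.2 = y from by omega]
      exact hS
  · rintro ⟨d, hd9, h | h | h⟩
    · rw [tri_iff] at h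
      rw [h.2.2.2.2.1] at hS
      exact absurd hS (by decide)
    · rw [tri_iff] at h
      have hmid := h.2.2.2.2.2.1
      rw [show x - d.1 + d.1 = x from by omega, show y - d.2 + d.2 = y from by omega,
          hS] at hmid
      exact absurd hmid (by decide)
    · rw [tri_iff] at h
      obtain ⟨h1, h2, h3, hne, hMl, hAl, _⟩ := h
      rw [mem_dirs9] at hd9
      refine ⟨d, (mem_bdirs d).mpr ⟨hd9.1, hd9.2.1, hd9.2.2.1, hd9.2.2.2, hne⟩, ?_⟩
      simp only [Bool.and_eq_true, decide_eq_true_eq, beq_iff_eq]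
      refine ⟨⟨⟨by omega, by omega, by omega, by omega, h1.1, h1.2.1, h1.2.2.1, h1.2.2.2⟩, ?_⟩, hMl⟩
      rw [show x - d.1 = x - 2*d.1 + d.1 from by omega,
          show y - d.2 = y - 2*d.2 + d.2 from by omega]
      exact hAl

lemma marked_false_of_other (grid : List (List String)) {tr tc x y : Int}
    (hM : atI grid x y ≠ "M") (hA : atI grid x y ≠ "A") (hS : atI grid x y ≠ "S") :
    markedBy grid tr tc (anchors tr tc) x y = false := by
  cases hmb : markedBy grid tr tc (anchors tr tc) x y
  · rfl
  exfalso
  obtain ⟨d, _, h | h | h⟩ := (marked_iff grid x y).mp hmb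
  · rw [tri_iff] at h
    exact hM h.2.2.2.2.1
  · rw [tri_iff] at h
    have hmid := h.2.2.2.2.2.1
    rw [show x - d.1 + d.1 = x from by omega, show y - d.2 + d.2 = y from by omega] at hmid
    exact hA hmid
  · rw [tri_iff] at h
    have hend := h.2.2.2.2.2.2
    rw [show x - 2*d.1 + 2*d.1 = x from by omega, show y - 2*d.2 + 2*d.2 = y from by omega] at hend
    exact hS hend

lemma bcell_eq_marked (grid : List (List String)) {tr tc x y : Int}
    (hx : 0 ≤ x) (hx' : x < tr) (hy : 0 ≤ y) (hy' : y < tc) :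
    bcell grid tr tc x y =
      if markedBy grid tr tc (anchors tr tc) x y then atI grid x y else "." := by
  simp only [bcell]
  by_cases hM : atI grid x y = "M"
  · rw [if_pos hM, hM]
    rcases hmb : markedBy grid tr tc (anchors tr tc) x y
    · rw [if_neg (fun hh => by rw [(anyM_iff grid hx hx' hy hy' hM).mp hh] at hmb; cases hmb)]
      simp
    · rw [if_pos ((anyM_iff grid hx hx' hy hy' hM).mpr hmb)]
      simp
  · rw [if_neg hM]
    by_cases hA : atI grid x y = "A"
    · rw [if_pos hA, hA]
      rcases hmb : markedBy grid tr tc (anchors tr tc) x y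
      · rw [if_neg (fun hh => by rw [(anyA_iff grid hx hx' hy hy' hA).mp hh] at hmb; cases hmb)]
        simp
      · rw [if_pos ((anyA_iff grid hx hx' hy hy' hA).mpr hmb)]
        simp
    · rw [if_neg hA]
      by_cases hS : atI grid x y = "S"
      · rw [if_pos hS, hS]
        rcases hmb : markedBy grid tr tc (anchors tr tc) x y
        · rw [if_neg (fun hh => by rw [(anyS_iff grid hx hx' hy hy' hS).mp hh] at hmb; cases hmb)]
          simp
        · rw [if_pos ((anyS_iff grid hx hx' hy hy' hS).mpr hmb)]
          simp
      · rw [if_neg hS, marked_false_of_other grid hM hA hS, if_neg (by simp)]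

-- ===== VERDICT (by name: the statement is the Claim_ definition above) =====
theorem find_mas_spec : Claim_equal_find_mas := by
  intro grid _ _
  unfold Spec_find_mas
  rw [find_mas_eq_state, find_mas_alt_eq_build, stateOf]
  apply build_congr
  intro x y hx hx' hy hy'
  rw [bcell_eq_marked grid hx hx' hy hy']
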